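-- pv_equiv track=rewrite | github.com/cjhubbs/advent_of_code | 2015/day_10/10.py | see_say_split
-- ===== SOURCE A (Python) =====
-- def see_say_split(s):
--     substrings = []
--     prev_char = s[0]
--     substr = s[0]
--     for idx in range(1,len(s)):
--         if s[idx] == prev_char:
--             substr += s[idx]
--         else:
--             substrings.append(substr)
--             substr = s[idx]
--             prev_char = s[idx]
--     substrings.append(substr)
--     return substrings
-- ===== SOURCE B (Python) =====
-- import re
--
-- def see_say_split(s):
--     return [m.group() for m in re.finditer(r'(.|\n)\1*', s)]
-- ===== Notes on version B (the rewrite author's own statement) =====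
-- stated objective: idiomatic
-- what changed: Replaced the manual index loop with prev_char/substr string accumulators by a single re.finditer pass with the backreference pattern (.|\n)\1*, whose each match is one maximal run of identical characters; Pre_ excludes only the empty string, where A raises IndexError at s[0] and B returns [].
import Mathlib
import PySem

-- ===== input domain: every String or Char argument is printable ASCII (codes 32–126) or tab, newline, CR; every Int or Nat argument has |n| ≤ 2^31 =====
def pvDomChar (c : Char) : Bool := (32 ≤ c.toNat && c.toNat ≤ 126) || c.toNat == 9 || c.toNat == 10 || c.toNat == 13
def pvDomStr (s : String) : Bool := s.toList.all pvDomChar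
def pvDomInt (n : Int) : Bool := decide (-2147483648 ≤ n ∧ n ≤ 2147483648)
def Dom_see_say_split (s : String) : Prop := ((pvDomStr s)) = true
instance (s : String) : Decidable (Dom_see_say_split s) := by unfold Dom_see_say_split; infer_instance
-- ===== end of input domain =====

-- B replaces A's index loop with a regex run-matcher (re.finditer r'(.|\n)\1*'): same return
-- value on nonempty strings; A raises IndexError on "", which Pre_ excludes (B returns [] there).


-- ===== PORT A =====
-- A's for-loop over s[1:], with the same state (substrings, substr, prev_char)
def seeSayLoopA (cs : List Char) (substrings : List String) (substr : List Char) (prev : Char) : List String :=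
  match cs with
  | [] => substrings ++ [String.mk substr]
  | c :: rest =>
    if c = prev then seeSayLoopA rest substrings (substr ++ [c]) prev
    else seeSayLoopA rest (substrings ++ [String.mk substr]) [c] c

def see_say_split (s : String) : List String :=
  match s.toList with
  | [] => []           -- unreachable under Pre_ (Python raises IndexError at s[0])
  | c :: rest => seeSayLoopA rest [] [c] c

-- ===== PORT B =====
-- re.finditer(r'(.|\n)\1*', s): each match, scanning left to right, is the maximal run of
-- characters equal to the character at the current position (backreference \1*); this is the
-- exact semantics of that pattern, transcribed as peeling one maximal run at a time.
def regexRuns (cs : List Char) : List String :=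
  match cs with
  | [] => []
  | c :: rest =>
    String.mk (c :: rest.takeWhile (· == c)) :: regexRuns (rest.dropWhile (· == c))
termination_by cs.length
decreasing_by
  simp only [List.length_cons]
  exact Nat.lt_succ_of_le (List.length_dropWhile_le _ _)

def see_say_split_alt (s : String) : List String := regexRuns s.toList

-- ===== PRECONDITION & SPEC =====
-- Pre_ excludes only the empty string, where A raises IndexError (s[0]).
def Pre_see_say_split (s : String) : Prop := s ≠ ""
instance (s : String) : Decidable (Pre_see_say_split s) := by unfold Pre_see_say_split; infer_instance
def pvWitness_see_say_split : String := "111221"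

def Spec_see_say_split (s : String) (out : List String) : Prop := out = see_say_split_alt s
instance (s : String) (out : List String) : Decidable (Spec_see_say_split s out) := by unfold Spec_see_say_split; infer_instance

-- ===== CLAIM (what is proved, stated in full; the proofs are below) =====
def Claim_equal_see_say_split : Prop := ∀ (s : String), Dom_see_say_split s → Pre_see_say_split s → Spec_see_say_split s (see_say_split s)

-- ===== LEMMAS AND PROOFS =====

-- A's loop, continued with current run `substr` whose last char context is `prev`,
-- produces acc ++ (the run extended by the chars equal to prev) :: runs of the rest.
theorem seeSayLoopA_eq (cs : List Char) : ∀ (acc : List String) (substr : List Char) (prev : Char),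
    seeSayLoopA cs acc substr prev =
      acc ++ String.mk (substr ++ cs.takeWhile (· == prev)) :: regexRuns (cs.dropWhile (· == prev)) := by
  induction cs with
  | nil => intro acc substr prev; simp [seeSayLoopA, regexRuns]
  | cons c rest ih =>
    intro acc substr prev
    by_cases h : c = prev
    · subst h
      simp only [seeSayLoopA, ih, List.takeWhile_cons, List.dropWhile_cons,
        beq_self_eq_true, if_true, List.append_assoc, List.cons_append, List.nil_append]
    · have hb : (c == prev) = false := by simp [h]
      simp only [seeSayLoopA, if_neg h, ih, List.takeWhile_cons, List.dropWhile_cons, hb,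
        Bool.false_eq_true, if_false, List.append_assoc, List.cons_append, List.nil_append,
        List.append_nil, regexRuns]

-- ===== VERDICT (by name: the statement is the Claim_ definition above) =====
theorem see_say_split_spec : Claim_equal_see_say_split := by
  intro s _ _
  unfold Spec_see_say_split see_say_split see_say_split_alt
  rcases hl : s.toList with _ | ⟨c, rest⟩ <;> clear hl
  · simp only [regexRuns]
  · show seeSayLoopA rest [] [c] c = regexRuns (c :: rest)
    rw [seeSayLoopA_eq, regexRuns]
    simp
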